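-- pv_equiv track=rewrite | github.com/dongpin/investment-strategy | strategy/nova_strategy.py | _confirmed_level_from_scores
-- ===== SOURCE A (Python) =====
-- _BEAR_LEVEL_LABELS = {
--     0: ("All Clear",  "🟢"),
--     1: ("Watch",      "🟡"),
--     2: ("Caution",    "🟠"),
--     3: ("Bear Alert", "🔴"),
--     4: ("Extreme",    "⚫"),
-- }
--
-- def _bear_severity(score: int) -> tuple:
--     """Bear risk score → (level 0-4, label, icon)."""
--     if   score <= 1:  lv = 0
--     elif score <= 3:  lv = 1
--     elif score <= 6:  lv = 2
--     elif score <= 10: lv = 3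
--     else:             lv = 4
--     lbl, icon = _BEAR_LEVEL_LABELS[lv]
--     return lv, lbl, icon
--
-- def _confirmed_level_from_scores(recent_scores: list) -> int:
--     """
--     Level 4 confirmed after 5 consecutive days (reduces false alarms at bounces).
--     Levels 1–3 confirmed after 3 consecutive days.
--     """
--     if not recent_scores:
--         return 0
--     raw_levels = [_bear_severity(s)[0] for s in recent_scores]
--     n = len(raw_levels)
--
--     if n >= 5 and all(l >= 4 for l in raw_levels[-5:]):
--         return 4
--     for target in [3, 2, 1]:
--         window = raw_levels[-min(3, n):]
--         if all(l >= target for l in window):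
--             return target
--     return 0
-- ===== SOURCE B (Python) =====
-- _BEAR_LEVEL_LABELS = {
--     0: ("All Clear",  "🟢"),
--     1: ("Watch",      "🟡"),
--     2: ("Caution",    "🟠"),
--     3: ("Bear Alert", "🔴"),
--     4: ("Extreme",    "⚫"),
-- }
--
-- def _bear_severity(score: int) -> tuple:
--     """Bear risk score → (level 0-4, label, icon)."""
--     if   score <= 1:  lv = 0
--     elif score <= 3:  lv = 1
--     elif score <= 6:  lv = 2
--     elif score <= 10: lv = 3
--     else:             lv = 4
--     lbl, icon = _BEAR_LEVEL_LABELS[lv]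
--     return lv, lbl, icon
--
-- def _confirmed_level_from_scores(recent_scores: list) -> int:
--     """Same confirmation rule, but the descending target loop with its
--     repeated all() scans is replaced by one min-then-clamp closed form."""
--     if not recent_scores:
--         return 0
--     raw_levels = [_bear_severity(s)[0] for s in recent_scores]
--     n = len(raw_levels)
--     if n >= 5 and all(l >= 4 for l in raw_levels[-5:]):
--         return 4
--     return min(min(raw_levels[-min(3, n):]), 3)
-- ===== Notes on version B (the rewrite author's own statement) =====
-- stated objective: simpler
-- what changed: The descending for-target loop over the candidate levels three, two, one with its repeated all() window scans is replaced by a single min over the window followed by a clamp to 3.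
import Mathlib
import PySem

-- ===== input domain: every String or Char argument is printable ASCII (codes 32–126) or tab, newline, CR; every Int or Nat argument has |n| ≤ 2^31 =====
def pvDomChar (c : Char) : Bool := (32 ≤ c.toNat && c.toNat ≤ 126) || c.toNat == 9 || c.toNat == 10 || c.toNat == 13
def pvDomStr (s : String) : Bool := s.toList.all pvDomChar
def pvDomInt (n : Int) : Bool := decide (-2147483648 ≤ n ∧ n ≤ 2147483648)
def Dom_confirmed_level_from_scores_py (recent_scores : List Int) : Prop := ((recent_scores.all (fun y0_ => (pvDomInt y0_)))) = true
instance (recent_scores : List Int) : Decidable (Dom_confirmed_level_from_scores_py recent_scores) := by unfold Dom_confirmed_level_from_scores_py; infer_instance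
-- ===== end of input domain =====

-- B replaces A's descending target loop (with repeated all() scans) by one
-- min-over-window-then-clamp closed form; objective: simpler.


-- ===== PORT A =====
-- _bear_severity(s)[0]: only the level component is ever used (both Pythons use the same helper verbatim)
def bear_level (score : Int) : Int :=
  if score ≤ 1 then 0
  else if score ≤ 3 then 1
  else if score ≤ 6 then 2
  else if score ≤ 10 then 3
  else 4

-- the 'for target in [3, 2, 1]: … return target' loop with early return; recomputes the window each iteration as A does
def bearTargetLoop (raw_levels : List Int) (n : Int) : List Int → Int
  | [] => 0
  | target :: rest =>
      if (PySem.List.slice raw_levels (some (-(min 3 n))) none).all (fun l => decide (target ≤ l)) then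
        target
      else bearTargetLoop raw_levels n rest

def confirmed_level_from_scores_py (recent_scores : List Int) : Int :=
  if recent_scores = [] then 0
  else
    let raw_levels := recent_scores.map (fun s => bear_level s)
    let n : Int := (raw_levels.length : Int)
    if 5 ≤ n ∧ (PySem.List.slice raw_levels (some (-5)) none).all (fun l => decide (4 ≤ l)) then 4
    else bearTargetLoop raw_levels n [3, 2, 1]

-- ===== PORT B =====
def confirmed_level_from_scores_py_alt (recent_scores : List Int) : Int :=
  if recent_scores = [] then 0
  else
    let raw_levels := recent_scores.map (fun s => bear_level s)
    let n : Int := (raw_levels.length : Int)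
    if 5 ≤ n ∧ (PySem.List.slice raw_levels (some (-5)) none).all (fun l => decide (4 ≤ l)) then 4
    else
      match PySem.List.min? (PySem.List.slice raw_levels (some (-(min 3 n))) none) (fun x => x) with
      | some m => min m 3
      | none => 0   -- unreachable: the window is nonempty (recent_scores ≠ [])

-- ===== PRECONDITION & SPEC =====
def Spec_confirmed_level_from_scores_py (recent_scores : List Int) (out : Int) : Prop := out = confirmed_level_from_scores_py_alt recent_scores
instance (recent_scores : List Int) (out : Int) : Decidable (Spec_confirmed_level_from_scores_py recent_scores out) := by unfold Spec_confirmed_level_from_scores_py; infer_instance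

-- ===== CLAIM (what is proved, stated in full; the proofs are below) =====
def Claim_equal_confirmed_level_from_scores_py : Prop := ∀ (recent_scores : List Int), Dom_confirmed_level_from_scores_py recent_scores → Spec_confirmed_level_from_scores_py recent_scores (confirmed_level_from_scores_py recent_scores)

-- ===== LEMMAS AND PROOFS =====

-- c is a lower bound of the running-min fold iff it bounds the seed and every element
lemma le_foldl_min_iff (t : List Int) (a c : Int) :
    c ≤ t.foldl min a ↔ (c ≤ a ∧ ∀ x ∈ t, c ≤ x) := by
  induction t generalizing a with
  | nil => simp
  | cons b t ih =>
      simp only [List.foldl_cons, ih, List.mem_cons]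
      constructor
      · rintro ⟨h1, h2⟩
        refine ⟨by omega, ?_⟩
        rintro x (rfl | hx)
        · omega
        · exact h2 x hx
      · rintro ⟨h1, h2⟩
        refine ⟨by have := h2 b (Or.inl rfl); omega, fun x hx => h2 x (Or.inr hx)⟩

lemma all_le_eq (h : Int) (tl : List Int) (c : Int) :
    (h :: tl).all (fun l => decide (c ≤ l)) = decide (c ≤ tl.foldl min h) := by
  rw [Bool.eq_iff_iff, decide_eq_true_eq, le_foldl_min_iff]
  simp

-- A's descending target loop equals min-then-clamp on a nonempty all-nonnegative window
lemma bearTargetLoop_eq_min (raw_levels : List Int) (n : Int) (h : Int) (tl : List Int)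
    (hw : PySem.List.slice raw_levels (some (-(min 3 n))) none = h :: tl)
    (h0 : 0 ≤ tl.foldl min h) :
    bearTargetLoop raw_levels n [3, 2, 1] = min (tl.foldl min h) 3 := by
  simp only [bearTargetLoop, hw, all_le_eq, decide_eq_true_eq]
  split_ifs <;> omega

-- the window raw_levels[-min(3, n):] is the suffix dropping all but min(3, n) elements
lemma window_eq_drop (raw_levels : List Int) (hne : raw_levels ≠ []) :
    PySem.List.slice raw_levels (some (-(min 3 (raw_levels.length : Int)))) none
      = raw_levels.drop (raw_levels.length - min 3 raw_levels.length) := by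
  have hlen : 1 ≤ raw_levels.length := by
    cases raw_levels with
    | nil => exact absurd rfl hne
    | cons a t => simp
  have hcast : (min 3 (raw_levels.length : Int)) = ((min 3 raw_levels.length : Nat) : Int) := by
    push_cast; omega
  rw [hcast, PySem.List.slice_from_neg_natCast raw_levels (min 3 raw_levels.length) (by omega)]

lemma bear_level_nonneg (s : Int) : 0 ≤ bear_level s := by
  unfold bear_level; split_ifs <;> omega

-- ===== VERDICT (by name: the statement is the Claim_ definition above) =====
theorem confirmed_level_from_scores_py_spec : Claim_equal_confirmed_level_from_scores_py := by
  intro rs _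
  unfold Spec_confirmed_level_from_scores_py confirmed_level_from_scores_py confirmed_level_from_scores_py_alt
  by_cases hnil : rs = []
  · simp [hnil]
  · simp only [if_neg hnil]
    set raw := rs.map (fun s => bear_level s) with hraw
    have hrne : raw ≠ [] := by
      cases rs with
      | nil => exact absurd rfl hnil
      | cons a t => simp [hraw]
    set n : Int := (raw.length : Int) with hn
    by_cases h4 : 5 ≤ n ∧ (PySem.List.slice raw (some (-5)) none).all (fun l => decide (4 ≤ l)) = true
    · simp [h4]
    · simp only [if_neg h4]
      have hlen : 1 ≤ raw.length := by
        cases rs with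
        | nil => exact absurd rfl hnil
        | cons a t => simp [hraw]
      have hdrop := window_eq_drop raw hrne
      rw [← hn] at hdrop
      obtain ⟨h, tl, hw⟩ : ∃ h tl, PySem.List.slice raw (some (-(min 3 n))) none = h :: tl := by
        cases hc : PySem.List.slice raw (some (-(min 3 n))) none with
        | nil =>
            rw [hc] at hdrop
            rw [eq_comm, List.drop_eq_nil_iff] at hdrop
            omega
        | cons x xs => exact ⟨x, xs, rfl⟩
      have hmemraw : ∀ x ∈ h :: tl, 0 ≤ x := by
        intro x hx
        have hxr : x ∈ raw := by
          have : x ∈ raw.drop (raw.length - min 3 raw.length) := by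
            rw [← hdrop, hw]; exact hx
          exact List.drop_subset _ _ this
        rw [hraw] at hxr
        obtain ⟨s, _, rfl⟩ := List.mem_map.mp hxr
        exact bear_level_nonneg s
      have h0 : 0 ≤ tl.foldl min h :=
        (le_foldl_min_iff tl h 0).mpr
          ⟨hmemraw h (List.mem_cons_self ..), fun x hx => hmemraw x (List.mem_cons_of_mem _ hx)⟩
      rw [hw, PySem.List.min?_id_cons, bearTargetLoop_eq_min raw n h tl hw h0]
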